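-- pv_equiv track=rewrite | github.com/alexeymishkin/Learning | PyBursa/02/Docs/2.py | chet_nechet
-- ===== SOURCE A (Python) =====
-- def chet_nechet(inp_list):
--     res = []
--     if len(inp_list) % 2 == 0:
--         for x in inp_list:
--             if x % 2 == 0:
--                 res.append(x)
--     else:
--         for x in inp_list:
--             if x % 2 != 0:
--                 res.append(x)
--     return res
-- ===== SOURCE B (Python) =====
-- def chet_nechet(inp_list):
--     # Partition once into parity buckets, then select the bucket whose
--     # key equals the parity of the list length.
--     buckets = {0: [], 1: []}
--     for x in inp_list:
--         buckets[x % 2].append(x)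
--     return buckets[len(inp_list) % 2]
-- ===== Notes on version B (the rewrite author's own statement) =====
-- stated objective: alternative
-- what changed: Replaces A's two branch-guarded filtering loops with an unconditional grouping pass into a dict of parity buckets, returning the bucket keyed by len % 2.
import Mathlib
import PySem

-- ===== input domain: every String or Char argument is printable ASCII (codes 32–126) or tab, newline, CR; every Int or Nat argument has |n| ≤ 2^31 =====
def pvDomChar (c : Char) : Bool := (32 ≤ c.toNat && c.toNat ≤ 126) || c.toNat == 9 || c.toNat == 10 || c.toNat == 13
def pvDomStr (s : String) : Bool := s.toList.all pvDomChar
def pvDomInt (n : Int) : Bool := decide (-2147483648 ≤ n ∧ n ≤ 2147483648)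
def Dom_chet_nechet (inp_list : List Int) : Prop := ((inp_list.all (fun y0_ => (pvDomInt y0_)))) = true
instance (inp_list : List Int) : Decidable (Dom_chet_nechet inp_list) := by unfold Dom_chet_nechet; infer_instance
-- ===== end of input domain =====

-- B replaces A's two branch-guarded filtering loops by one unconditional grouping pass
-- into parity buckets, then selects the bucket keyed by len % 2; objective: alternative.

-- ===== PORT A =====
-- A: if len % 2 == 0, loop appending even elements; else loop appending odd elements.
def chet_nechet (inp_list : List Int) : List Int :=
  if PySem.Int.mod (Int.ofNat inp_list.length) 2 = 0 then
    inp_list.foldl (fun res x => if PySem.Int.mod x 2 = 0 then res ++ [x] else res) []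
  else
    inp_list.foldl (fun res x => if PySem.Int.mod x 2 ≠ 0 then res ++ [x] else res) []

-- ===== PORT B =====
-- B: buckets = {0: [], 1: []}; for x: buckets[x % 2].append(x); return buckets[len % 2].
-- The dict with the fixed keys 0/1 is ported as PySem.Dict Int (List Int), appended to via modify.
def chet_nechet_alt (inp_list : List Int) : List Int :=
  let buckets : PySem.Dict Int (List Int) :=
    ((PySem.Dict.empty).insert 0 []).insert 1 []
  let buckets := inp_list.foldl
    (fun b x => b.modify (PySem.Int.mod x 2) [] (fun l => l ++ [x])) buckets
  buckets.getD (PySem.Int.mod (Int.ofNat inp_list.length) 2) []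

-- ===== PRECONDITION & SPEC =====
def Spec_chet_nechet (inp_list : List Int) (out : List Int) : Prop := out = chet_nechet_alt inp_list
instance (inp_list : List Int) (out : List Int) : Decidable (Spec_chet_nechet inp_list out) := by unfold Spec_chet_nechet; infer_instance

-- ===== CLAIM (what is proved, stated in full; the proofs are below) =====
def Claim_equal_chet_nechet : Prop := ∀ (inp_list : List Int), Dom_chet_nechet inp_list → Spec_chet_nechet inp_list (chet_nechet inp_list)

-- ===== LEMMAS AND PROOFS =====

-- Python mod by 2 is Lean's emod by 2 (divisor positive).
theorem pymod2 (a : Int) : PySem.Int.mod a 2 = a % 2 :=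
  PySem.Int.mod_eq_emod_of_pos (by norm_num)

-- A's append-accumulator loop is filtering by the branch predicate.
theorem foldl_append_filter (p : Int → Prop) [DecidablePred p] (xs : List Int) (acc : List Int) :
    xs.foldl (fun res x => if p x then res ++ [x] else res) acc
      = acc ++ xs.filter (fun x => decide (p x)) := by
  induction xs generalizing acc with
  | nil => simp
  | cons y ys ih =>
    simp only [List.foldl, List.filter]
    by_cases hy : p y <;> simp [hy, ih]

-- B's grouping fold: the bucket read at key k collects, in order, the elements
-- whose Python parity is k, appended after whatever the bucket already held.
theorem getD_buckets_fold (xs : List Int) (d : PySem.Dict Int (List Int)) (k : Int) :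
    (xs.foldl (fun b x => b.modify (PySem.Int.mod x 2) [] (fun l => l ++ [x])) d).getD k []
      = d.getD k [] ++ xs.filter (fun x => decide (PySem.Int.mod x 2 = k)) := by
  induction xs generalizing d with
  | nil => simp
  | cons y ys ih =>
    simp only [List.foldl, List.filter, ih]
    rw [PySem.Dict.getD_modify]
    by_cases hk : k = PySem.Int.mod y 2
    · simp [hk]
    · rw [pymod2] at hk
      have h2 : ¬ (y % 2 = k) := fun h => hk h.symm
      simp [hk, h2]

-- ===== VERDICT (by name: the statement is the Claim_ definition above) =====
theorem chet_nechet_spec : Claim_equal_chet_nechet := by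
  intro inp_list _
  unfold Spec_chet_nechet chet_nechet chet_nechet_alt
  rw [getD_buckets_fold]
  have hinit : ∀ k : Int, (((PySem.Dict.empty).insert (0 : Int) ([] : List Int)).insert 1 []).getD k [] = [] := by
    intro k
    by_cases h1 : k = 1
    · rw [h1, PySem.Dict.getD_insert_self]
    · rw [PySem.Dict.getD_insert_of_ne _ _ _ h1]
      by_cases h0 : k = 0
      · rw [h0, PySem.Dict.getD_insert_self]
      · rw [PySem.Dict.getD_insert_of_ne _ _ _ h0]
        rfl
  rw [hinit]
  simp only [List.nil_append, pymod2]
  rcases (by omega : Int.ofNat inp_list.length % 2 = 0 ∨ Int.ofNat inp_list.length % 2 = 1) with h | h <;>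
    simp only [h] <;> split_ifs with hc
  · rw [foldl_append_filter (fun x => x % 2 = 0)]
    simp
  · simp at hc
  · simp at hc
  · rw [foldl_append_filter (fun x => x % 2 ≠ 0)]
    simp only [List.nil_append]
    apply List.filter_congr
    intro x _
    simp only [decide_eq_decide]
    omega
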